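-- pv_equiv track=rewrite | github.com/riazakhan94/tictactoe_simple_2p | _00_standalone_ttt_2p.py | did_player_win
-- ===== SOURCE A (Python) =====
-- from itertools import combinations
--
-- def did_player_win(player_list):
--     if(len(player_list) < 3):
--         return(False)
--
--     grand_list = [{0, 1, 2}, {3, 4, 5}, {6, 7, 8}] + \
--         [{0, 3, 6}, {1, 4, 7}, {2, 5, 8}] + \
--             [{0, 4, 8}, {6, 4, 2}]
--
--
--     all_comb = list(combinations(player_list, 3) )
--     tmp_n_comb = len(all_comb)
--     for i in range(0, tmp_n_comb):
--         if set(all_comb[i]) in grand_list: # if mathces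
--             return(True) # then return
--     return(False)
-- ===== SOURCE B (Python) =====
-- WIN_LINES = [{0, 1, 2}, {3, 4, 5}, {6, 7, 8},
--              {0, 3, 6}, {1, 4, 7}, {2, 5, 8},
--              {0, 4, 8}, {2, 4, 6}]
--
-- def did_player_win(player_list):
--     cells = set(player_list)
--     return any(line <= cells for line in WIN_LINES)
-- ===== Notes on version B (the rewrite author's own statement) =====
-- stated objective: faster
-- what changed: Instead of enumerating all 3-combinations of the player's cells and comparing each as a set against the winning lines, B builds the player's cell set once and tests each of the 8 winning lines for being a subset of it.
import Mathlib
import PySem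

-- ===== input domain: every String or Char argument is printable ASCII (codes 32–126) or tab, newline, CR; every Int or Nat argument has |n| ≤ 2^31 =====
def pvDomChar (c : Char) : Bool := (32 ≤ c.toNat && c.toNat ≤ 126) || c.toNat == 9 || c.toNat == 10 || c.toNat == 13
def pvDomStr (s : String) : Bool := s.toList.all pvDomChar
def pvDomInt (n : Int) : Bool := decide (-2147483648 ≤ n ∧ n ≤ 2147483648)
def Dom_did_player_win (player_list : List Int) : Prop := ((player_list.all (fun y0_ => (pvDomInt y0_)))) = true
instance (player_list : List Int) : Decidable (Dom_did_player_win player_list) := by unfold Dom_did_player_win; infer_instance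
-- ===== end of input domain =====

-- B replaces A's enumeration of all 3-combinations with a single pass: build the player's
-- cell set once and test each of the 8 winning lines for being a subset of it (objective: faster).

-- ===== PORT A =====
-- grand_list of A (list of Python sets, in A's order)
def grandList : List (PySem.Set Int) :=
  [PySem.Set.ofList [0, 1, 2], PySem.Set.ofList [3, 4, 5], PySem.Set.ofList [6, 7, 8],
   PySem.Set.ofList [0, 3, 6], PySem.Set.ofList [1, 4, 7], PySem.Set.ofList [2, 5, 8],
   PySem.Set.ofList [0, 4, 8], PySem.Set.ofList [6, 4, 2]]

-- itertools.combinations(xs, 2) / (xs, 3): all index-increasing pairs/triples, in Python's order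
def combos2 : List Int → List (Int × Int)
  | [] => []
  | x :: xs => xs.map (fun y => (x, y)) ++ combos2 xs

def combos3 : List Int → List (Int × Int × Int)
  | [] => []
  | x :: xs => (combos2 xs).map (fun p => (x, p.1, p.2)) ++ combos3 xs

-- A's for-loop with early return over all_comb: 'if set(all_comb[i]) in grand_list: return True'
def checkCombs : List (Int × Int × Int) → Bool
  | [] => false
  | t :: rest =>
    if grandList.any (fun s => PySem.Set.equal (PySem.Set.ofList [t.1, t.2.1, t.2.2]) s) then true
    else checkCombs rest

def did_player_win (player_list : List Int) : Bool :=
  if player_list.length < 3 then false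
  else checkCombs (combos3 player_list)

-- ===== PORT B =====
def winLines : List (PySem.Set Int) :=
  [PySem.Set.ofList [0, 1, 2], PySem.Set.ofList [3, 4, 5], PySem.Set.ofList [6, 7, 8],
   PySem.Set.ofList [0, 3, 6], PySem.Set.ofList [1, 4, 7], PySem.Set.ofList [2, 5, 8],
   PySem.Set.ofList [0, 4, 8], PySem.Set.ofList [2, 4, 6]]

def did_player_win_alt (player_list : List Int) : Bool :=
  let cells := PySem.Set.ofList player_list
  winLines.any (fun line => PySem.Set.issubset line cells)

-- ===== PRECONDITION & SPEC =====
def Spec_did_player_win (player_list : List Int) (out : Bool) : Prop := out = did_player_win_alt player_list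
instance (player_list : List Int) (out : Bool) : Decidable (Spec_did_player_win player_list out) := by unfold Spec_did_player_win; infer_instance

-- ===== CLAIM (what is proved, stated in full; the proofs are below) =====
def Claim_equal_did_player_win : Prop := ∀ (player_list : List Int), Dom_did_player_win player_list → Spec_did_player_win player_list (did_player_win player_list)

-- ===== LEMMAS AND PROOFS =====

theorem checkCombs_eq_any (l : List (Int × Int × Int)) :
    checkCombs l = l.any (fun t => grandList.any (fun s => PySem.Set.equal (PySem.Set.ofList [t.1, t.2.1, t.2.2]) s)) := by
  induction l with
  | nil => rfl
  | cons t rest ih => by_cases h : grandList.any (fun s => PySem.Set.equal (PySem.Set.ofList [t.1, t.2.1, t.2.2]) s) <;> simp [checkCombs, ih, h]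

theorem mem_combos2 (l : List Int) (p : Int × Int) :
    p ∈ combos2 l ↔ [p.1, p.2].Sublist l := by
  induction l with
  | nil => simp [combos2]
  | cons x xs ih =>
    simp only [combos2, List.mem_append, List.mem_map, ih]
    constructor
    · rintro (⟨y, hy, rfl⟩ | h)
      · exact (List.singleton_sublist.mpr hy).cons₂ x
      · exact h.cons x
    · intro h
      rcases List.sublist_cons_iff.mp h with h' | ⟨r, hr, hsl⟩
      · exact Or.inr h'
      · left
        obtain ⟨a, b⟩ := p
        simp only [List.cons.injEq] at hr
        obtain ⟨rfl, rfl⟩ := hr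
        exact ⟨b, List.singleton_sublist.mp hsl, rfl⟩

theorem mem_combos3 (l : List Int) (t : Int × Int × Int) :
    t ∈ combos3 l ↔ [t.1, t.2.1, t.2.2].Sublist l := by
  induction l with
  | nil => simp [combos3]
  | cons x xs ih =>
    simp only [combos3, List.mem_append, List.mem_map, ih]
    constructor
    · rintro (⟨p, hp, rfl⟩ | h)
      · exact ((mem_combos2 xs p).mp hp).cons₂ x
      · exact h.cons x
    · intro h
      rcases List.sublist_cons_iff.mp h with h' | ⟨r, hr, hsl⟩
      · exact Or.inr h'
      · left
        obtain ⟨a, b, c⟩ := t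
        simp only [List.cons.injEq] at hr
        obtain ⟨rfl, rfl⟩ := hr
        exact ⟨(b, c), (mem_combos2 xs (b, c)).mpr hsl, rfl⟩

-- backward: three distinct cells in the list give a matching combination
theorem exists_combo (pl : List Int) (a b c : Int) (hnd : ([a, b, c] : List Int).Nodup)
    (hsub : ∀ x ∈ ([a, b, c] : List Int), x ∈ pl) :
    3 ≤ pl.length ∧ ∃ t ∈ combos3 pl,
      ∀ u, u ∈ PySem.Set.ofList [t.1, t.2.1, t.2.2] ↔ u ∈ ([a, b, c] : List Int) := by
  obtain ⟨l', hperm, hsl⟩ := List.Nodup.subperm hnd hsub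
  have hlen : l'.length = 3 := hperm.length_eq
  match l', hlen with
  | [x, y, z], _ =>
    refine ⟨by simpa using hsl.length_le, (x, y, z), (mem_combos3 pl _).mpr hsl, ?_⟩
    intro u
    rw [PySem.Set.mem_ofList]
    exact hperm.mem_iff (a := u)

theorem did_player_win_spec' (pl : List Int) : did_player_win pl = did_player_win_alt pl := by
  rw [Bool.eq_iff_iff]
  constructor
  · intro hA
    unfold did_player_win at hA
    split at hA
    · exact absurd hA (by simp)
    rw [checkCombs_eq_any, List.any_eq_true] at hA
    obtain ⟨t, ht, hm⟩ := hA
    rw [List.any_eq_true] at hm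
    obtain ⟨s, hs, heq⟩ := hm
    rw [PySem.Set.equal_iff] at heq
    have helem : ∀ u ∈ s, u ∈ pl := by
      intro u hu
      have := (heq u).mpr hu
      rw [PySem.Set.mem_ofList] at this
      have hsub := ((mem_combos3 pl t).mp ht).subset
      simp only [List.mem_cons, List.not_mem_nil, or_false] at this
      rcases this with rfl | rfl | rfl <;> apply hsub <;> simp
    unfold did_player_win_alt
    rw [List.any_eq_true]
    have key : ∀ line : PySem.Set Int, (∀ u ∈ line, u ∈ s) →
        PySem.Set.issubset line (PySem.Set.ofList pl) = true := by
      intro line hline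
      rw [PySem.Set.issubset_iff]
      intro x hx
      rw [PySem.Set.mem_ofList]
      exact helem x (hline x hx)
    fin_cases hs
    · exact ⟨_, by simp [winLines], key _ (fun u hu => hu)⟩
    · exact ⟨_, by simp [winLines], key _ (fun u hu => hu)⟩
    · exact ⟨_, by simp [winLines], key _ (fun u hu => hu)⟩
    · exact ⟨_, by simp [winLines], key _ (fun u hu => hu)⟩
    · exact ⟨_, by simp [winLines], key _ (fun u hu => hu)⟩
    · exact ⟨_, by simp [winLines], key _ (fun u hu => hu)⟩
    · exact ⟨_, by simp [winLines], key _ (fun u hu => hu)⟩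
    · refine ⟨PySem.Set.ofList [2, 4, 6], by simp [winLines], key _ ?_⟩
      intro u hu
      rw [PySem.Set.mem_ofList] at hu ⊢
      simp only [List.mem_cons, List.not_mem_nil, or_false] at hu ⊢
      tauto
  · intro hB
    unfold did_player_win_alt at hB
    rw [List.any_eq_true] at hB
    obtain ⟨line, hline, hsub⟩ := hB
    rw [PySem.Set.issubset_iff] at hsub
    have step : ∀ (a b c : Int), ([a, b, c] : List Int).Nodup →
        (∀ u, u ∈ line ↔ u ∈ ([a, b, c] : List Int)) →
        (∃ s ∈ grandList, ∀ u, u ∈ s ↔ u ∈ ([a, b, c] : List Int)) →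
        did_player_win pl = true := by
      intro a b c hnd hlm ⟨s, hsg, hsm⟩
      have hmem : ∀ x ∈ ([a, b, c] : List Int), x ∈ pl := by
        intro x hx
        have := hsub x ((hlm x).mpr hx)
        rwa [PySem.Set.mem_ofList] at this
      obtain ⟨hlen, t, ht, hiff⟩ := exists_combo pl a b c hnd hmem
      unfold did_player_win
      rw [if_neg (by omega)]
      rw [checkCombs_eq_any, List.any_eq_true]
      refine ⟨t, ht, ?_⟩
      rw [List.any_eq_true]
      refine ⟨s, hsg, ?_⟩
      rw [PySem.Set.equal_iff]
      intro u
      rw [hiff u, hsm u]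
    fin_cases hline
    · exact step 0 1 2 (by decide) (fun u => by rw [PySem.Set.mem_ofList]) ⟨PySem.Set.ofList [0, 1, 2], by simp [grandList], fun u => by rw [PySem.Set.mem_ofList]⟩
    · exact step 3 4 5 (by decide) (fun u => by rw [PySem.Set.mem_ofList]) ⟨PySem.Set.ofList [3, 4, 5], by simp [grandList], fun u => by rw [PySem.Set.mem_ofList]⟩
    · exact step 6 7 8 (by decide) (fun u => by rw [PySem.Set.mem_ofList]) ⟨PySem.Set.ofList [6, 7, 8], by simp [grandList], fun u => by rw [PySem.Set.mem_ofList]⟩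
    · exact step 0 3 6 (by decide) (fun u => by rw [PySem.Set.mem_ofList]) ⟨PySem.Set.ofList [0, 3, 6], by simp [grandList], fun u => by rw [PySem.Set.mem_ofList]⟩
    · exact step 1 4 7 (by decide) (fun u => by rw [PySem.Set.mem_ofList]) ⟨PySem.Set.ofList [1, 4, 7], by simp [grandList], fun u => by rw [PySem.Set.mem_ofList]⟩
    · exact step 2 5 8 (by decide) (fun u => by rw [PySem.Set.mem_ofList]) ⟨PySem.Set.ofList [2, 5, 8], by simp [grandList], fun u => by rw [PySem.Set.mem_ofList]⟩
    · exact step 0 4 8 (by decide) (fun u => by rw [PySem.Set.mem_ofList]) ⟨PySem.Set.ofList [0, 4, 8], by simp [grandList], fun u => by rw [PySem.Set.mem_ofList]⟩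
    · refine step 2 4 6 (by decide) (fun u => by rw [PySem.Set.mem_ofList]) ⟨PySem.Set.ofList [6, 4, 2], by simp [grandList], fun u => ?_⟩
      rw [PySem.Set.mem_ofList]
      simp only [List.mem_cons, List.not_mem_nil, or_false]
      tauto

-- ===== VERDICT (by name: the statement is the Claim_ definition above) =====
theorem did_player_win_spec : Claim_equal_did_player_win := by
  intro pl _
  unfold Spec_did_player_win
  exact did_player_win_spec' pl
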